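-- pv_equiv track=rewrite | github.com/i-n-samartsev/homework-repository | homework7/hw2.py | reversed_converted_word
-- ===== SOURCE A (Python) =====
-- from typing import Generator
--
-- def reversed_converted_word(word: str) -> Generator:
--     """
--         Converts a string, considering that # is a backspace character.
--         Returns reversed result string.
--     """
--     backspaces = 0
--     word = iter(reversed(word))
--     for char in word:
--         if char == '#':
--             backspaces += 1
--         else:
--             if backspaces:
--                 backspaces -= 1
--                 continue
--             yield char
-- ===== SOURCE B (Python) =====
-- def reversed_converted_word(word):
--     """Forward pass maintaining a stack (pop on '#'), then yield the stack in reverse."""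
--     stack = []
--     for char in word:
--         if char == '#':
--             if stack:
--                 stack.pop()
--         else:
--             stack.append(char)
--     yield from reversed(stack)
-- ===== Notes on version B (the rewrite author's own statement) =====
-- stated objective: alternative
-- what changed: Replaces the backward scan with a pending-backspace counter by a forward pass maintaining a stack (pop on '#') followed by yielding the stack in reverse.
import Mathlib
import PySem

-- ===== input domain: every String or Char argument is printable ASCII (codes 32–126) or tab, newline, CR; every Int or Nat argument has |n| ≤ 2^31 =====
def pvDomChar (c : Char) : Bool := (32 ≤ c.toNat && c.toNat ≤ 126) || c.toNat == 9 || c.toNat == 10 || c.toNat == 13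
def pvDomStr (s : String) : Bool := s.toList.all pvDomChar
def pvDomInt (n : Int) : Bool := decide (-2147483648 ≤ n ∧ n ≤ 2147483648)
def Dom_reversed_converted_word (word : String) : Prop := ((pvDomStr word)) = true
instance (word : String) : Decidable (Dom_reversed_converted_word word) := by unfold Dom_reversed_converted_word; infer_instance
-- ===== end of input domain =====

-- B replaces A's backward scan with a backspace counter by a forward stack pass followed by
-- reversing the stack (objective: alternative decomposition, same cost).

-- ===== PORT A =====
-- A's loop over reversed(word): '#' increments the pending-backspace counter, otherwise a
-- positive counter consumes the char, otherwise the char is yielded.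
def rcwGo : List Char → Nat → List String
  | [], _ => []
  | c :: rest, b =>
    if c = '#' then rcwGo rest (b + 1)
    else if 0 < b then rcwGo rest (b - 1)
    else String.ofList [c] :: rcwGo rest b

def reversed_converted_word (word : String) : List String :=
  rcwGo word.toList.reverse 0

-- ===== PORT B =====
-- forward pass: pop on '#' (dropLast of [] is [], matching the guarded pop), push otherwise
def rcwStep (s : List Char) (c : Char) : List Char :=
  if c = '#' then s.dropLast else s ++ [c]

def reversed_converted_word_alt (word : String) : List String :=
  ((word.toList.foldl rcwStep []).reverse).map (fun c => String.ofList [c])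

-- ===== PRECONDITION & SPEC =====
def Spec_reversed_converted_word (word : String) (out : List String) : Prop := out = reversed_converted_word_alt word
instance (word : String) (out : List String) : Decidable (Spec_reversed_converted_word word out) := by unfold Spec_reversed_converted_word; infer_instance

-- ===== CLAIM (what is proved, stated in full; the proofs are below) =====
def Claim_equal_reversed_converted_word : Prop := ∀ (word : String), Dom_reversed_converted_word word → Spec_reversed_converted_word word (reversed_converted_word word)

-- ===== LEMMAS AND PROOFS =====

-- A's backward scan with b pending backspaces equals the stack of the forward scan with its
-- last b elements removed, reversed.
theorem rcwGo_eq_stack (l : List Char) (b : Nat) :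
    rcwGo l b =
      (((l.reverse.foldl rcwStep []).take ((l.reverse.foldl rcwStep []).length - b)).reverse).map
        (fun c => String.ofList [c]) := by
  induction l generalizing b with
  | nil => simp [rcwGo]
  | cons c t ih =>
    have hfold : (c :: t).reverse.foldl rcwStep [] = rcwStep (t.reverse.foldl rcwStep []) c := by
      simp [List.foldl_append]
    set s := t.reverse.foldl rcwStep [] with hs
    by_cases hc : c = '#'
    · -- '#' : counter +1 on A's side, dropLast on the stack side
      have : rcwStep s c = s.dropLast := by simp [rcwStep, hc]
      rw [show rcwGo (c :: t) b = rcwGo t (b + 1) by simp [rcwGo, hc], ih, hfold, this]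
      have hdl : s.dropLast = s.take (s.length - 1) := by
        rw [List.dropLast_eq_take]
      rw [hdl, List.take_take, List.length_take]
      congr 2
      congr 1
      omega
    · have hstep : rcwStep s c = s ++ [c] := by simp [rcwStep, hc]
      by_cases hb : 0 < b
      · -- pending backspace consumes c
        rw [show rcwGo (c :: t) b = rcwGo t (b - 1) by simp [rcwGo, hc, hb], ih, hfold, hstep]
        have hlen : s.length + 1 - b ≤ s.length := by omega
        rw [List.length_append, List.take_append_of_le_length (by simpa using hlen),
          show s.length + [c].length - b = s.length - (b - 1) by simp; omega]
      · -- b = 0 : c is emitted, stack grows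
        have hb0 : b = 0 := by omega
        subst hb0
        rw [show rcwGo (c :: t) 0 = String.ofList [c] :: rcwGo t 0 by simp [rcwGo, hc], ih, hfold,
          hstep]
        have htk : ∀ (l : List Char), List.take (l.length - 0) l = l := by
          intro l; simp
        rw [htk, htk, List.reverse_append]
        simp

-- ===== VERDICT (by name: the statement is the Claim_ definition above) =====
theorem reversed_converted_word_spec : Claim_equal_reversed_converted_word := by
  intro word _
  unfold Spec_reversed_converted_word reversed_converted_word reversed_converted_word_alt
  rw [rcwGo_eq_stack]
  simp
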